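-- pv_equiv track=rewrite | github.com/Sivakumar3695/Analyse-Impact-of-Branching-Heuristics-in-CDCL-type-AF-solvers | main.py | compute_friends
-- ===== SOURCE A (Python) =====
-- def compute_friends(attack_set):
--     friends_set = {}
--     for i in range(1, len(attack_set) + 1):
--         if not friends_set.get(i):
--             friends_set[i] = []
--         for j in range(i + 1, len(attack_set) + 1):
--             if i not in attack_set[j] and j not in attack_set[i]:
--                 friends_set[i].append(j)
--                 if friends_set.get(j):
--                     friends_set[j].append(i)
--                 else:
--                     friends_set[j] = []
--                     friends_set[j].append(i)
--     return friends_set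
-- ===== SOURCE B (Python) =====
-- def compute_friends(attack_set):
--     nodes = range(1, len(attack_set) + 1)
--     return {i: [j for j in nodes
--                 if j != i and j not in attack_set[i] and i not in attack_set[j]]
--             for i in nodes}
-- ===== Notes on version B (the rewrite author's own statement) =====
-- stated objective: simpler
-- what changed: Replaces A's upper-triangular double loop that mutates two dict entries per friendly pair by a single dict comprehension computing each node's friend list independently with one full scan, keyed 1..n ascending; Pre_ excludes malformed dicts not keyed by 1..n (where one of the programs raises KeyError) and inputs where A's accidental first-discovery key order differs from ascending key order.
-- outside the precondition, e.g. on compute_friends({2: [1], 5: []}): A returns {1: [], 2: []}, B raises KeyError; on compute_friends({1: [2], 2: [3], 3: []}): A returns {1: [3], 3: [1], 2: []}, B returns {1: [3], 2: [], 3: [1]}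
import Mathlib
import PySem

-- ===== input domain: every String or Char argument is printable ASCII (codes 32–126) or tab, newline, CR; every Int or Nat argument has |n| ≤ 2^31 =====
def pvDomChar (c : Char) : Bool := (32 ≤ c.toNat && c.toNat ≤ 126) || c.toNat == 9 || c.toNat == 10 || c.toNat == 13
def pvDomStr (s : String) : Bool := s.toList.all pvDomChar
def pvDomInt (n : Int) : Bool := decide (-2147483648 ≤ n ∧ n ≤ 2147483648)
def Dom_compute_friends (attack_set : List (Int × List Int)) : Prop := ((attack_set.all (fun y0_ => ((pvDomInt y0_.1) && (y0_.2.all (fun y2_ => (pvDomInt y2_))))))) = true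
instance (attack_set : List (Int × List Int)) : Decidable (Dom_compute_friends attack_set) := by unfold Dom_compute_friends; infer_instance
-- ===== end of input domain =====

-- B computes each node's friend list independently by one full scan and returns the dict keyed
-- 1..n in ascending order, instead of A's upper-triangular double loop with simultaneous
-- bidirectional appends; objective: simpler (same cost, no speed claim).

-- ===== PORT A =====
-- body of A's inner `for j in range(i+1, len(attack_set)+1)` loop
def cfInner (att : PySem.Dict Int (List Int)) (i : Int)
    (fs : PySem.Dict Int (List Int)) (j : Int) : PySem.Dict Int (List Int) :=
  -- attack_set[j] / attack_set[i]: KeyError replaced by getD []; exact under Pre_ (keys 1..n present)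
  if i ∉ att.getD j [] ∧ j ∉ att.getD i [] then
    let fs1 := fs.modify i [] (· ++ [j])                      -- friends_set[i].append(j)
    if fs1.getD j [] ≠ [] then fs1.modify j [] (· ++ [i])     -- if friends_set.get(j): …append(i)
    else (fs1.insert j []).modify j [] (· ++ [i])             -- else: friends_set[j] = []; …append(i)
  else fs

-- body of A's outer `for i in range(1, len(attack_set)+1)` loop
def cfOuter (att : PySem.Dict Int (List Int)) (n : Int)
    (fs : PySem.Dict Int (List Int)) (i : Int) : PySem.Dict Int (List Int) :=
  let fs1 := if fs.getD i [] = [] then fs.insert i [] else fs -- if not friends_set.get(i): friends_set[i] = []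
  (PySem.List.pyRange (i + 1) (n + 1) 1).foldl (cfInner att i) fs1

def compute_friends (attack_set : List (Int × List Int)) : List (Int × List Int) :=
  let att : PySem.Dict Int (List Int) := PySem.Dict.mk attack_set  -- the dict argument as its association list
  let n : Int := (attack_set.length : Int)
  ((PySem.List.pyRange 1 (n + 1) 1).foldl (cfOuter att n) PySem.Dict.empty).items

-- ===== PORT B =====
def compute_friends_alt (attack_set : List (Int × List Int)) : List (Int × List Int) :=
  let att : PySem.Dict Int (List Int) := PySem.Dict.mk attack_set  -- the dict argument as its association list
  let nodes := PySem.List.pyRange 1 ((attack_set.length : Int) + 1) 1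
  -- dict comprehension over the distinct keys `nodes`: literally this association list;
  -- attack_set[i] / attack_set[j]: KeyError replaced by getD []; exact under Pre_ (keys 1..n present)
  nodes.map (fun i =>
    (i, nodes.filter (fun j => decide (j ≠ i ∧ j ∉ att.getD i [] ∧ i ∉ att.getD j []))))

-- ===== PRECONDITION & SPEC =====
-- graph notions Pre_ speaks about (shared with the proofs below)
def cfAtt (L : List (Int × List Int)) : PySem.Dict Int (List Int) := PySem.Dict.mk L
def cfN (L : List (Int × List Int)) : Int := (L.length : Int)
def cfNodes (L : List (Int × List Int)) : List Int := PySem.List.pyRange 1 (cfN L + 1) 1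
def cfFp (L : List (Int × List Int)) (k j : Int) : Bool :=
  decide (j ≠ k ∧ j ∉ (cfAtt L).getD k [] ∧ k ∉ (cfAtt L).getD j [])
-- k's friends: the nodes j with no attack in either direction between j and k
def cfF (L : List (Int × List Int)) (k : Int) : List Int := (cfNodes L).filter (cfFp L k)
-- k's smallest friend below k, else k itself
def cfM (L : List (Int × List Int)) (k : Int) : Int :=
  match PySem.List.min? ((cfF L k).filter (fun f => decide (f < k))) (fun x => x) with
  | some v => v
  | none => k

-- Pre_ restricts to well-formed inputs: distinct keys that (for length ≥ 2) include every node
-- 1..n, so that neither program hits a KeyError (A can also return on malformed dicts missing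
-- key 1 when its conjunction short-circuits; that accident is excluded, and B raises there).
-- Pre_ also excludes inputs on which A's dict key order — the order the upper-triangular pair
-- scan first discovers each node, i.e. non-decreasing in cfM — differs from ascending key order:
-- there A's key order is an accident of its dict building, and B returns the same friend lists
-- keyed ascending.
def Pre_compute_friends (attack_set : List (Int × List Int)) : Prop :=
  (attack_set.map Prod.fst).Nodup ∧
  (attack_set.length ≤ 1 ∨ ∀ k ∈ cfNodes attack_set, k ∈ attack_set.map Prod.fst) ∧
  (∀ k ∈ cfNodes attack_set, ∀ l ∈ cfNodes attack_set, k ≤ l →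
    cfM attack_set k ≤ cfM attack_set l)
instance (attack_set : List (Int × List Int)) : Decidable (Pre_compute_friends attack_set) := by
  unfold Pre_compute_friends; infer_instance

def pvWitness_compute_friends : (List (Int × List Int)) := [(1, []), (2, [])]

def Spec_compute_friends (attack_set : List (Int × List Int)) (out : List (Int × List Int)) : Prop :=
  out = compute_friends_alt attack_set
instance (attack_set : List (Int × List Int)) (out : List (Int × List Int)) :
    Decidable (Spec_compute_friends attack_set out) := by unfold Spec_compute_friends; infer_instance

-- ===== CLAIM (what is proved, stated in full; the proofs are below) =====
def Claim_equal_compute_friends : Prop := ∀ (attack_set : List (Int × List Int)),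
  Dom_compute_friends attack_set → Pre_compute_friends attack_set →
  Spec_compute_friends attack_set (compute_friends attack_set)

-- ===== LEMMAS AND PROOFS =====

-- proof-side abbreviations (A's loop invariant is in fact proved for every association list)
def cfGrp (L : List (Int × List Int)) (t : Int) : List Int :=
  (cfNodes L).filter (fun k => cfM L k == t)
def cfOrd (L : List (Int × List Int)) (t : Int) : List Int :=
  (PySem.List.pyRange 1 (t + 1) 1).flatMap (cfGrp L)
def cfP (L : List (Int × List Int)) (t k : Int) : List Int :=
  (cfF L k).filter (fun f => decide (min k f ≤ t))
def cfP2 (L : List (Int × List Int)) (t u k : Int) : List Int :=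
  (cfF L k).filter (fun f => decide (min k f ≤ t ∨ (min k f = t + 1 ∧ max k f ≤ u)))
def cfOrd2 (L : List (Int × List Int)) (t u : Int) : List Int :=
  cfOrd L t ++ (if cfM L (t + 1) = t + 1 then [t + 1] else []) ++
    (PySem.List.pyRange (t + 2) (u + 1) 1).filter (fun j => cfM L j == t + 1)
def mkm {ν : Type} (l : List Int) (f : Int → ν) : PySem.Dict Int ν :=
  PySem.Dict.mk (l.map (fun k => (k, f k)))

lemma mkm_get?_mem {ν : Type} {l : List Int} {k : Int} (f : Int → ν) (hk : k ∈ l) :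
    (mkm l f).get? k = some (f k) := by
  induction l with
  | nil => cases hk
  | cons a l ih =>
    simp only [mkm, List.map_cons, PySem.Dict.get?_mk_cons] at *
    by_cases h : a = k
    · subst h; simp
    · rcases List.mem_cons.mp hk with h' | h'
      · exact absurd h'.symm h
      · simpa [h] using ih h' 
lemma mkm_get?_not_mem {ν : Type} {l : List Int} {k : Int} (f : Int → ν) (hk : k ∉ l) :
    (mkm l f).get? k = none := by
  induction l with
  | nil => rfl
  | cons a l ih =>
    simp only [mkm, List.map_cons, PySem.Dict.get?_mk_cons] at *
    have h : a ≠ k := fun h => hk (h ▸ List.mem_cons_self)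
    simpa [h] using ih (fun h' => hk (List.mem_cons_of_mem _ h'))
lemma mkm_getD_mem {ν : Type} {l : List Int} {k : Int} (f : Int → ν) (d : ν) (hk : k ∈ l) :
    (mkm l f).getD k d = f k := by
  rw [PySem.Dict.getD_eq_get?_getD, mkm_get?_mem f hk]; rfl
lemma mkm_getD_not_mem {ν : Type} {l : List Int} {k : Int} (f : Int → ν) (d : ν) (hk : k ∉ l) :
    (mkm l f).getD k d = d := by
  rw [PySem.Dict.getD_eq_get?_getD, mkm_get?_not_mem f hk]; rfl
lemma mkm_contains {ν : Type} {l : List Int} {k : Int} (f : Int → ν) :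
    ((mkm l f).contains k) = decide (k ∈ l) := by
  rw [PySem.Dict.contains_eq_decide_mem_keys]
  simp [mkm, PySem.Dict.keys]
lemma mkm_congr {ν : Type} {l : List Int} {f g : Int → ν} (h : ∀ k ∈ l, f k = g k) :
    mkm l f = mkm l g := by
  unfold mkm
  exact congrArg PySem.Dict.mk (List.map_congr_left (fun k hk => by rw [h k hk]))
lemma mkm_insert_mem {ν : Type} {l : List Int} {k : Int} (f : Int → ν) (v : ν) (hk : k ∈ l) :
    (mkm l f).insert k v = mkm l (fun x => if x = k then v else f x) := by
  unfold PySem.Dict.insert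
  rw [mkm_contains]
  simp only [hk, decide_true, if_true]
  unfold mkm
  congr 1
  simp only [List.map_map]
  refine List.map_congr_left (fun x hx => ?_)
  by_cases h : x = k <;> simp [h]
lemma mkm_insert_not_mem {ν : Type} {l : List Int} {k : Int} (f : Int → ν) (v : ν) (hk : k ∉ l) :
    (mkm l f).insert k v = mkm (l ++ [k]) (fun x => if x = k then v else f x) := by
  unfold PySem.Dict.insert
  rw [mkm_contains]
  simp only [hk, decide_false, Bool.false_eq_true, if_false]
  unfold mkm
  congr 1
  simp only [List.map_append, List.map_cons, List.map_nil]
  congr 1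
  refine List.map_congr_left (fun x hx => ?_)
  have h : x ≠ k := fun h => hk (h ▸ hx)
  simp [h]

lemma filter_chain {l : List Int} (hnd : l.Pairwise (· < ·)) (p q : Int → Bool) (x : Int)
    (hx : x ∈ l) (hq : q x = true) (hp : p x = false)
    (hlt : ∀ y ∈ l, y < x → q y = p y)
    (hgt : ∀ y ∈ l, x < y → q y = false ∧ p y = false) :
    l.filter q = l.filter p ++ [x] := by
  induction l with
  | nil => cases hx
  | cons a l ih =>
    have hrest := (List.pairwise_cons.mp hnd).1
    have hnd' := (List.pairwise_cons.mp hnd).2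
    by_cases h : a = x
    · subst h
      have hq' : ∀ y ∈ l, q y = false ∧ p y = false := fun y hy => hgt y (List.mem_cons_of_mem _ hy) (hrest y hy)
      simp only [List.filter_cons, hq, hp]
      rw [List.filter_eq_nil_iff.mpr (fun y hy => by simp [(hq' y hy).1]),
          List.filter_eq_nil_iff.mpr (fun y hy => by simp [(hq' y hy).2])]
      rfl
    · have hx' : x ∈ l := by
        rcases List.mem_cons.mp hx with h' | h'
        · exact absurd h'.symm h
        · exact h'
      have hax : a < x := hrest x hx'
      have := hlt a List.mem_cons_self hax
      simp only [List.filter_cons, this]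
      rw [ih hnd' hx' (fun y hy hyx => hlt y (List.mem_cons_of_mem _ hy) hyx)
          (fun y hy hxy => hgt y (List.mem_cons_of_mem _ hy) hxy)]
      cases p a <;> simp

lemma mem_cfF {L : List (Int × List Int)} {k f : Int} :
    f ∈ cfF L k ↔ (1 ≤ f ∧ f < cfN L + 1) ∧ f ≠ k ∧
      f ∉ (cfAtt L).getD k [] ∧ k ∉ (cfAtt L).getD f [] := by
  simp [cfF, cfFp, cfNodes, List.mem_filter, PySem.List.mem_pyRange_one, and_assoc]
lemma mem_cfNodes {L : List (Int × List Int)} {k : Int} :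
    k ∈ cfNodes L ↔ 1 ≤ k ∧ k < cfN L + 1 := by
  simp [cfNodes, PySem.List.mem_pyRange_one]

lemma cfF_pairwise (L : List (Int × List Int)) (k : Int) : (cfF L k).Pairwise (· < ·) :=
  (PySem.List.pairwise_lt_pyRange_one 1 (cfN L + 1)).filter _
lemma cfF_sym {L : List (Int × List Int)} {k j : Int} (hk : k ∈ cfNodes L) :
    j ∈ cfF L k → k ∈ cfF L j := by
  intro hj
  rcases mem_cfF.mp hj with ⟨hb, hne, h1, h2⟩
  rcases mem_cfNodes.mp hk with ⟨hk1, hk2⟩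
  exact mem_cfF.mpr ⟨⟨hk1, hk2⟩, fun h => hne h.symm, h2, h1⟩

lemma cfM_eq_some {L : List (Int × List Int)} {k v : Int}
    (h : PySem.List.min? ((cfF L k).filter (fun f => decide (f < k))) (fun x => x) = some v) :
    cfM L k = v := by unfold cfM; rw [h]

lemma cfM_eq_self {L : List (Int × List Int)} {k : Int}
    (h : PySem.List.min? ((cfF L k).filter (fun f => decide (f < k))) (fun x => x) = none) :
    cfM L k = k := by unfold cfM; rw [h]

lemma cfM_le (L : List (Int × List Int)) (k : Int) : cfM L k ≤ k := by
  cases h : PySem.List.min? ((cfF L k).filter (fun f => decide (f < k))) (fun x => x) with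
  | none => rw [cfM_eq_self h]
  | some v =>
    rw [cfM_eq_some h]
    have hv := PySem.List.min?_mem h
    have := of_decide_eq_true (List.mem_filter.mp hv).2
    omega
lemma cfM_mem_cfF {L : List (Int × List Int)} {k : Int} (h : cfM L k ≠ k) :
    cfM L k ∈ cfF L k ∧ cfM L k < k := by
  cases h2 : PySem.List.min? ((cfF L k).filter (fun f => decide (f < k))) (fun x => x) with
  | none => exact absurd (cfM_eq_self h2) h
  | some v =>
    rw [cfM_eq_some h2]
    have hv := PySem.List.min?_mem h2
    exact ⟨(List.mem_filter.mp hv).1, of_decide_eq_true (List.mem_filter.mp hv).2⟩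
lemma cfM_min {L : List (Int × List Int)} {k f : Int} (hf : f ∈ cfF L k) (hfk : f < k) :
    cfM L k ≤ f := by
  have hmem : f ∈ (cfF L k).filter (fun f => decide (f < k)) :=
    List.mem_filter.mpr ⟨hf, decide_eq_true hfk⟩
  cases h : PySem.List.min? ((cfF L k).filter (fun f => decide (f < k))) (fun x => x) with
  | none => exact absurd (((PySem.List.min?_eq_none_iff _ _).mp h) ▸ hmem) (List.not_mem_nil)
  | some v => rw [cfM_eq_some h]; exact PySem.List.min?_isMin h f hmem
lemma cfM_pos {L : List (Int × List Int)} {k : Int} (hk : 1 ≤ k) : 1 ≤ cfM L k := by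
  by_cases h : cfM L k = k
  · omega
  · have := (mem_cfF.mp (cfM_mem_cfF h).1).1
    omega

lemma mem_cfOrd {L : List (Int × List Int)} {t k : Int} :
    k ∈ cfOrd L t ↔ k ∈ cfNodes L ∧ cfM L k ≤ t := by
  unfold cfOrd cfGrp
  simp only [List.mem_flatMap, List.mem_filter, PySem.List.mem_pyRange_one, beq_iff_eq]
  constructor
  · rintro ⟨s, ⟨hs1, hs2⟩, hk, hm⟩
    exact ⟨hk, by omega⟩
  · rintro ⟨hk, hm⟩
    have h1 : 1 ≤ cfM L k := cfM_pos (mem_cfNodes.mp hk).1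
    exact ⟨cfM L k, ⟨by omega, by omega⟩, hk, rfl⟩

-- the two filters agree at the two ends of iteration i = t+1
lemma cfP2_base (L : List (Int × List Int)) (t k : Int) : cfP2 L t (t + 1) k = cfP L t k := by
  refine List.filter_congr fun f hf => ?_
  have hfk : f ≠ k := (mem_cfF.mp hf).2.1
  apply decide_eq_decide.mpr
  omega
lemma cfP2_final {L : List (Int × List Int)} {t k : Int} (hk : k ∈ cfNodes L) :
    cfP2 L t (cfN L) k = cfP L (t + 1) k := by
  rcases mem_cfNodes.mp hk with ⟨hk1, hk2⟩
  refine List.filter_congr fun f hf => ?_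
  rcases mem_cfF.mp hf with ⟨⟨hf1, hf2⟩, hfk, -, -⟩
  apply decide_eq_decide.mpr
  omega
lemma cfOrd2_final {L : List (Int × List Int)} {t : Int} (ht0 : 0 ≤ t) (ht : t < cfN L) :
    cfOrd2 L t (cfN L) = cfOrd L (t + 1) := by
  unfold cfOrd2 cfOrd
  rw [PySem.List.pyRange_one_succ_right (by omega : (1:Int) ≤ t + 1), List.flatMap_append]
  simp only [List.flatMap_cons, List.flatMap_nil, List.append_nil]
  rw [List.append_assoc]
  congr 1
  unfold cfGrp cfNodes
  rw [PySem.List.pyRange_one_append 1 (t + 2) (cfN L + 1) (by omega) (by omega), List.filter_append]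
  congr 1
  rw [show (t:Int) + 2 = t + 1 + 1 from by ring,
    PySem.List.pyRange_one_succ_right (by omega : (1:Int) ≤ t + 1), List.filter_append,
    List.filter_eq_nil_iff.mpr ?_]
  · simp only [List.nil_append, List.filter_cons, List.filter_nil]
    by_cases hm : cfM L (t + 1) = t + 1
    · simp [hm]
    · simp [hm]
  · intro k hk
    rcases (PySem.List.mem_pyRange_one).mp hk with ⟨h1, h2⟩
    have := cfM_le L k
    simp only [beq_iff_eq]
    omega
lemma cfP2_congr_other {L : List (Int × List Int)} {t u k : Int} (hki : k ≠ t + 1)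
    (hku : k ≠ u + 1) : cfP2 L t (u + 1) k = cfP2 L t u k := by
  refine List.filter_congr fun f hf => ?_
  have hfk : f ≠ k := (mem_cfF.mp hf).2.1
  apply decide_eq_decide.mpr
  omega
lemma cfP2_congr_notC {L : List (Int × List Int)} {t u : Int} (hun : u + 1 ∈ cfNodes L)
    (hC : ¬ (u + 1 ∈ cfF L (t + 1))) (k : Int) : cfP2 L t (u + 1) k = cfP2 L t u k := by
  refine List.filter_congr fun f hf => ?_
  have hfk : f ≠ k := (mem_cfF.mp hf).2.1
  apply decide_eq_decide.mpr
  constructor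
  · rintro (h | ⟨hmin, hmax⟩)
    · exact Or.inl h
    · by_cases hcase : max k f ≤ u
      · exact Or.inr ⟨hmin, hcase⟩
      · exfalso
        rcases (by omega : (k = t + 1 ∧ f = u + 1) ∨ (f = t + 1 ∧ k = u + 1)) with
          ⟨hk', hf'⟩ | ⟨hf', hk'⟩
        · exact hC (hk' ▸ hf' ▸ hf)
        · exact hC (cfF_sym (hk' ▸ hun) (by rw [← hf', ← hk']; exact hf))
  · rintro (h | ⟨hmin, hmax⟩)
    · exact Or.inl h
    · exact Or.inr ⟨hmin, by omega⟩

-- A's gate: `if not friends_set.get(i): friends_set[i] = []`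
lemma step_gate {L : List (Int × List Int)} {t : Int} (ht0 : 0 ≤ t) (ht : t < cfN L) :
    (if (mkm (cfOrd L t) (cfP L t)).getD (t + 1) [] = []
      then (mkm (cfOrd L t) (cfP L t)).insert (t + 1) []
      else mkm (cfOrd L t) (cfP L t)) =
    mkm (cfOrd2 L t (t + 1)) (cfP2 L t (t + 1)) := by
  have hord2 : cfOrd2 L t (t + 1) = cfOrd L t ++ (if cfM L (t + 1) = t + 1 then [t + 1] else []) := by
    unfold cfOrd2
    rw [show (t:Int) + 1 + 1 = t + 2 from by ring, PySem.List.pyRange_one_eq_nil (le_refl _)]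
    simp
  by_cases hm : cfM L (t + 1) = t + 1
  · have hnotin : (t + 1) ∉ cfOrd L t := by
      rw [mem_cfOrd]; rintro ⟨-, hle⟩; omega
    rw [mkm_getD_not_mem _ _ hnotin, if_pos rfl, mkm_insert_not_mem _ _ hnotin, hord2, if_pos hm]
    refine mkm_congr fun k hk => ?_
    rw [cfP2_base]
    rcases List.mem_append.mp hk with hk | hk
    · have hne : k ≠ t + 1 := fun h => hnotin (h ▸ hk)
      rw [if_neg hne]
    · rw [List.mem_singleton.mp hk, if_pos rfl]
      symm
      unfold cfP
      rw [List.filter_eq_nil_iff]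
      intro f hf
      simp only [decide_eq_true_eq]
      by_cases hlt : f < t + 1
      · have h2 := cfM_min hf hlt
        omega
      · omega
  · have hlt' : cfM L (t + 1) < t + 1 := lt_of_le_of_ne (cfM_le L (t + 1)) hm
    have hmp : 1 ≤ cfM L (t + 1) := cfM_pos (by omega)
    have hin : (t + 1) ∈ cfOrd L t :=
      mem_cfOrd.mpr ⟨mem_cfNodes.mpr ⟨by omega, by omega⟩, by omega⟩
    rw [mkm_getD_mem _ _ hin]
    have hmm := cfM_mem_cfF hm
    have hne : cfP L t (t + 1) ≠ [] :=
      List.ne_nil_of_mem (List.mem_filter.mpr ⟨hmm.1, by simp only [decide_eq_true_eq]; omega⟩)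
    rw [if_neg hne, hord2, if_neg hm, List.append_nil]
    exact mkm_congr fun k hk => (cfP2_base L t k).symm

-- one step of A's inner loop
lemma step_inner {L : List (Int × List Int)} {t u : Int} (ht0 : 0 ≤ t) (ht : t < cfN L)
    (hu : t + 1 ≤ u) (hun : u + 1 ≤ cfN L) :
    cfInner (cfAtt L) (t + 1) (mkm (cfOrd2 L t u) (cfP2 L t u)) (u + 1) =
    mkm (cfOrd2 L t (u + 1)) (cfP2 L t (u + 1)) := by
  have hiN : (t + 1) ∈ cfNodes L := mem_cfNodes.mpr ⟨by omega, by omega⟩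
  have hjN : (u + 1) ∈ cfNodes L := mem_cfNodes.mpr ⟨by omega, by omega⟩
  simp only [cfInner]
  by_cases hC : (t + 1) ∉ (cfAtt L).getD (u + 1) [] ∧ (u + 1) ∉ (cfAtt L).getD (t + 1) []
  case neg =>
    rw [if_neg hC]
    have hCF : (u + 1) ∉ cfF L (t + 1) := by
      intro h
      rcases mem_cfF.mp h with ⟨hb, hne, h1, h2⟩
      exact hC ⟨h2, h1⟩
    have hord : cfOrd2 L t (u + 1) = cfOrd2 L t u := by
      unfold cfOrd2
      rw [PySem.List.pyRange_one_succ_right (by omega : t + 2 ≤ u + 1), List.filter_append]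
      have hne : cfM L (u + 1) ≠ t + 1 := by
        intro hmj
        have hmem := cfM_mem_cfF (by omega : cfM L (u + 1) ≠ u + 1)
        rw [hmj] at hmem
        exact hCF (cfF_sym hjN hmem.1)
      simp [hne]
    rw [hord]
    exact (mkm_congr fun k _ => (cfP2_congr_notC hjN hCF k)).symm
  case pos =>
    rw [if_pos hC]
    have hjF : (u + 1) ∈ cfF L (t + 1) :=
      mem_cfF.mpr ⟨⟨by omega, by omega⟩, by omega, hC.2, hC.1⟩
    have hiF : (t + 1) ∈ cfF L (u + 1) := cfF_sym hiN hjF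
    have hiOrd2 : (t + 1) ∈ cfOrd2 L t u := by
      unfold cfOrd2
      by_cases hm : cfM L (t + 1) = t + 1
      · simp [hm]
      · have h1 := cfM_le L (t + 1)
        have h2 : 1 ≤ cfM L (t + 1) := cfM_pos (by omega)
        have hmem : (t + 1) ∈ cfOrd L t := mem_cfOrd.mpr ⟨hiN, by omega⟩
        simp [hmem]
    have hPi : cfP2 L t u (t + 1) ++ [u + 1] = cfP2 L t (u + 1) (t + 1) := by
      symm
      unfold cfP2
      refine filter_chain (cfF_pairwise L (t + 1)) _ _ (u + 1) hjF ?_ ?_ ?_ ?_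
      · apply decide_eq_true; omega
      · apply decide_eq_false; omega
      · intro y hy hylt
        have hb := mem_cfF.mp hy
        apply decide_eq_decide.mpr
        omega
      · intro y hy hgty
        exact ⟨decide_eq_false (by omega), decide_eq_false (by omega)⟩
    have hstep1 : (mkm (cfOrd2 L t u) (cfP2 L t u)).modify (t + 1) [] (· ++ [u + 1])
        = mkm (cfOrd2 L t u)
            (fun x => if x = t + 1 then cfP2 L t (u + 1) (t + 1) else cfP2 L t u x) := by
      unfold PySem.Dict.modify
      rw [mkm_getD_mem _ _ hiOrd2, mkm_insert_mem _ _ hiOrd2]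
      simp only [hPi]
    rw [hstep1]
    have hmj_le : cfM L (u + 1) ≤ t + 1 := cfM_min hiF (by omega)
    by_cases hmj : cfM L (u + 1) ≤ t
    · -- j is already a key: `friends_set.get(j)` is truthy
      have hjOrd : (u + 1) ∈ cfOrd2 L t u := by
        unfold cfOrd2
        have hmem : (u + 1) ∈ cfOrd L t := mem_cfOrd.mpr ⟨hjN, hmj⟩
        simp [hmem]
      have hgd : (mkm (cfOrd2 L t u)
          (fun x => if x = t + 1 then cfP2 L t (u + 1) (t + 1) else cfP2 L t u x)).getD (u + 1) []
          = cfP2 L t u (u + 1) := by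
        rw [mkm_getD_mem _ _ hjOrd, if_neg (by omega : u + 1 ≠ t + 1)]
      have hmjne : cfM L (u + 1) ≠ u + 1 := by omega
      have hmmem := cfM_mem_cfF hmjne
      have hne : cfP2 L t u (u + 1) ≠ [] :=
        List.ne_nil_of_mem (List.mem_filter.mpr ⟨hmmem.1, decide_eq_true (by omega)⟩)
      rw [hgd, if_pos hne]
      have hPj : cfP2 L t u (u + 1) ++ [t + 1] = cfP2 L t (u + 1) (u + 1) := by
        symm
        unfold cfP2
        refine filter_chain (cfF_pairwise L (u + 1)) _ _ (t + 1) hiF ?_ ?_ ?_ ?_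
        · apply decide_eq_true; omega
        · apply decide_eq_false; omega
        · intro y hy hylt
          have hb := mem_cfF.mp hy
          apply decide_eq_decide.mpr
          omega
        · intro y hy hgty
          have hb := mem_cfF.mp hy
          have hyne : y ≠ u + 1 := hb.2.1
          exact ⟨decide_eq_false (by omega), decide_eq_false (by omega)⟩
      unfold PySem.Dict.modify
      rw [hgd, mkm_insert_mem _ _ hjOrd]
      simp only [hPj]
      have hord : cfOrd2 L t (u + 1) = cfOrd2 L t u := by
        unfold cfOrd2
        rw [PySem.List.pyRange_one_succ_right (by omega : t + 2 ≤ u + 1), List.filter_append]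
        simp [show cfM L (u + 1) ≠ t + 1 by omega]
      rw [hord]
      refine mkm_congr fun k hk => ?_
      by_cases hkj : k = u + 1
      · simp [hkj]
      · by_cases hki : k = t + 1
        · rw [hki] at hkj ⊢
          simp [hkj]
        · simp only [if_neg hkj, if_neg hki]
          exact (cfP2_congr_other hki hkj).symm
    · -- j is a fresh key
      have hmj' : cfM L (u + 1) = t + 1 := by omega
      have hjOrd : (u + 1) ∉ cfOrd2 L t u := by
        intro hmem
        rcases List.mem_append.mp hmem with h12 | h3
        · rcases List.mem_append.mp h12 with h1 | h2
          · rcases mem_cfOrd.mp h1 with ⟨-, hle⟩; omega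
          · revert h2
            by_cases hm : cfM L (t + 1) = t + 1 <;> simp [hm]
            omega
        · rcases List.mem_filter.mp h3 with ⟨hr, -⟩
          rcases PySem.List.mem_pyRange_one.mp hr with ⟨-, hlt2⟩
          omega
      have hgd : (mkm (cfOrd2 L t u)
          (fun x => if x = t + 1 then cfP2 L t (u + 1) (t + 1) else cfP2 L t u x)).getD (u + 1) []
          = [] := mkm_getD_not_mem _ _ hjOrd
      rw [hgd, if_neg (fun h => h rfl), mkm_insert_not_mem _ _ hjOrd]
      have hjmem : (u + 1) ∈ cfOrd2 L t u ++ [u + 1] := by simp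
      unfold PySem.Dict.modify
      rw [mkm_getD_mem _ _ hjmem, mkm_insert_mem _ _ hjmem]
      have hord : cfOrd2 L t (u + 1) = cfOrd2 L t u ++ [u + 1] := by
        unfold cfOrd2
        rw [PySem.List.pyRange_one_succ_right (by omega : t + 2 ≤ u + 1), List.filter_append]
        simp [hmj', List.append_assoc]
      rw [hord]
      refine mkm_congr fun k hk => ?_
      by_cases hkj : k = u + 1
      · simp only [hkj, if_true]
        simp only [List.nil_append]
        symm
        unfold cfP2
        have hlt3 : ∀ y ∈ cfF L (u + 1), y < t + 1 →
            (decide (min (u + 1) y ≤ t ∨ (min (u + 1) y = t + 1 ∧ max (u + 1) y ≤ u + 1)))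
              = (fun _ : Int => false) y := by
          intro y hy hylt
          have h := cfM_min hy (by omega : y < u + 1)
          rw [hmj'] at h
          exact absurd h (by omega)
        have hgt3 : ∀ y ∈ cfF L (u + 1), t + 1 < y →
            (decide (min (u + 1) y ≤ t ∨ (min (u + 1) y = t + 1 ∧ max (u + 1) y ≤ u + 1)))
              = false ∧ (fun _ : Int => false) y = false := by
          intro y hy hgty
          have hyne : y ≠ u + 1 := (mem_cfF.mp hy).2.1
          exact ⟨decide_eq_false (by omega), rfl⟩
        rw [filter_chain (cfF_pairwise L (u + 1)) (fun _ => false) _ (t + 1) hiF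
            (decide_eq_true (by omega)) rfl hlt3 hgt3]
        simp
      · have hkmem : k ∈ cfOrd2 L t u := (List.mem_append.mp hk).resolve_right (by simp [hkj])
        simp only [if_neg hkj]
        by_cases hki : k = t + 1
        · simp [hki]
        · simp only [if_neg hki]
          exact (cfP2_congr_other hki hkj).symm

-- A's whole inner loop
lemma inner_loop {L : List (Int × List Int)} {t : Int} (ht0 : 0 ≤ t) (ht : t < cfN L) (s : Nat)
    (hs : t + 1 + (s : Int) ≤ cfN L) :
    (PySem.List.pyRange (t + 2) (t + 1 + (s : Int) + 1) 1).foldl (cfInner (cfAtt L) (t + 1))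
      (mkm (cfOrd2 L t (t + 1)) (cfP2 L t (t + 1))) =
    mkm (cfOrd2 L t (t + 1 + (s : Int))) (cfP2 L t (t + 1 + (s : Int))) := by
  induction s with
  | zero =>
    simp only [Nat.cast_zero, add_zero]
    rw [PySem.List.pyRange_one_eq_nil (by omega : t + 1 + 1 ≤ t + 2)]
    rfl
  | succ s ih =>
    rw [show ((s + 1 : Nat) : Int) = (s : Int) + 1 from by push_cast; ring] at hs ⊢
    have hs' : t + 1 + (s : Int) ≤ cfN L := by omega
    rw [show t + 1 + ((s : Int) + 1) = t + 1 + (s : Int) + 1 from by ring,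
      PySem.List.pyRange_one_succ_right (by omega : t + 2 ≤ t + 1 + (s : Int) + 1),
      List.foldl_append]
    simp only [List.foldl_cons, List.foldl_nil]
    rw [ih hs']
    exact step_inner ht0 ht (by omega) (by omega)

-- A's outer loop invariant
lemma outer_loop (L : List (Int × List Int)) (t : Nat) (ht : (t : Int) ≤ cfN L) :
    (PySem.List.pyRange 1 ((t : Int) + 1) 1).foldl (cfOuter (cfAtt L) (cfN L)) PySem.Dict.empty =
    mkm (cfOrd L t) (cfP L t) := by
  induction t with
  | zero =>
    simp only [Nat.cast_zero, zero_add]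
    rw [PySem.List.pyRange_one_eq_nil (le_refl 1)]
    rfl
  | succ t ih =>
    rw [show ((t + 1 : Nat) : Int) = (t : Int) + 1 from by push_cast; ring] at ht ⊢
    have ht' : (t : Int) ≤ cfN L := by omega
    rw [PySem.List.pyRange_one_succ_right (by omega : (1 : Int) ≤ (t : Int) + 1),
      List.foldl_append]
    simp only [List.foldl_cons, List.foldl_nil]
    rw [ih ht']
    simp only [cfOuter]
    rw [step_gate (by omega) (by omega)]
    have hs := inner_loop (L := L) (t := (t : Int)) (by omega) (by omega)
      ((cfN L - (t : Int) - 1).toNat) ?hc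
    case hc =>
      rw [Int.toNat_of_nonneg (by omega)]; omega
    rw [Int.toNat_of_nonneg (by omega : (0:Int) ≤ cfN L - (t : Int) - 1)] at hs
    rw [show (t : Int) + 1 + (cfN L - (t : Int) - 1) = cfN L from by ring] at hs
    rw [show (t : Int) + 1 + 1 = (t : Int) + 2 from by ring]
    rw [hs, cfOrd2_final (by omega) (by omega)]
    exact mkm_congr fun k hk => cfP2_final (mem_cfOrd.mp hk).1

-- A's result: the friend lists, keyed in first-discovery order (non-decreasing cfM)
lemma A_eq (L : List (Int × List Int)) :
    compute_friends L = (cfOrd L (cfN L)).map (fun k => (k, cfF L k)) := by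
  have h := outer_loop L L.length (le_refl _)
  show ((PySem.List.pyRange 1 ((L.length : Int) + 1) 1).foldl
      (cfOuter (cfAtt L) (cfN L)) PySem.Dict.empty).items = _
  rw [h]
  show (cfOrd L (cfN L)).map (fun k => (k, cfP L (cfN L) k)) = _
  refine List.map_congr_left fun k hk => ?_
  rcases mem_cfNodes.mp (mem_cfOrd.mp hk).1 with ⟨hk1, hk2⟩
  have : cfP L (cfN L) k = cfF L k := by
    unfold cfP
    refine List.filter_eq_self.mpr fun f hf => ?_
    rcases mem_cfF.mp hf with ⟨⟨hf1, hf2⟩, -, -, -⟩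
    exact decide_eq_true (by omega)
  rw [this]

-- B's result: the same friend lists, keyed ascending
lemma B_eq (L : List (Int × List Int)) :
    compute_friends_alt L = (cfNodes L).map (fun k => (k, cfF L k)) := rfl

-- under Pre_'s monotone-touch condition, A's key order is ascending
lemma cfOrd_eq_nodes {L : List (Int × List Int)}
    (hmono : ∀ k ∈ cfNodes L, ∀ l ∈ cfNodes L, k ≤ l → cfM L k ≤ cfM L l) :
    cfOrd L (cfN L) = cfNodes L := by
  have hmem : ∀ k, k ∈ cfOrd L (cfN L) ↔ k ∈ cfNodes L := by
    intro k
    rw [mem_cfOrd]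
    constructor
    · rintro ⟨h, -⟩; exact h
    · intro h
      rcases mem_cfNodes.mp h with ⟨h1, h2⟩
      exact ⟨h, le_trans (cfM_le L k) (by omega)⟩
  have hnodes_pw : (cfNodes L).Pairwise (· < ·) :=
    PySem.List.pairwise_lt_pyRange_one 1 (cfN L + 1)
  have hord_pw : (cfOrd L (cfN L)).Pairwise (· < ·) := by
    unfold cfOrd
    rw [List.pairwise_flatMap]
    constructor
    · intro t ht
      exact hnodes_pw.filter _
    · refine (PySem.List.pairwise_lt_pyRange_one 1 (cfN L + 1)).imp ?_
      intro a b hab x hx y hy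
      rcases List.mem_filter.mp hx with ⟨hxN, hxM⟩
      rcases List.mem_filter.mp hy with ⟨hyN, hyM⟩
      have hxa : cfM L x = a := by simpa using hxM
      have hyb : cfM L y = b := by simpa using hyM
      by_contra hxy
      have := hmono y hyN x hxN (by omega)
      omega
  have hperm : List.Perm (cfOrd L (cfN L)) (cfNodes L) :=
    (List.perm_ext_iff_of_nodup (hord_pw.imp fun h => ne_of_lt h)
      (hnodes_pw.imp fun h => ne_of_lt h)).mpr hmem
  exact hperm.eq_of_pairwise (fun a b _ _ h1 h2 => absurd h2 (by omega)) hord_pw hnodes_pw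

-- ===== VERDICT (by name: the statement is the Claim_ definition above) =====
theorem compute_friends_spec : Claim_equal_compute_friends := by
  intro L _ hpre
  unfold Spec_compute_friends
  rw [A_eq, B_eq, cfOrd_eq_nodes hpre.2.2]
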